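-- pv_equiv track=rewrite | github.com/martin-sando/unclonix | key_generation_sandbox/key_generation_sandbox.py | get_best_circle
-- ===== SOURCE A (Python) =====
-- def check_inside(x, y, w, h, overflow=0, rd=0):
--     return (((x - rd) >= -overflow) & ((y - rd) >= -overflow)) & (
--             ((x + rd) < (w + overflow)) & ((y + rd) < (h + overflow)))
--
-- def get_best_circle(circles, width, height, max_overflow):
--     x0, y0, r0, pr0 = 0, 0, 0, 0
--     for circle in circles:
--         x = circle[0]
--         y = circle[1]
--         r = circle[2]
--         pr = circle[3]
--         if ((pr > pr0) | ((pr == pr0) & (r > r0))) & check_inside(x, y, width, height, max_overflow, r):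
--             x0, y0, r0, pr0 = circle
--
--     if r0 == 0:
--         return (0, 0, 0, 0)
--     return (x0, y0, r0, pr0)
-- ===== SOURCE B (Python) =====
-- def check_inside(x, y, w, h, overflow=0, rd=0):
--     return (x - rd >= -overflow and y - rd >= -overflow
--             and x + rd < w + overflow and y + rd < h + overflow)
--
-- def get_best_circle(circles, width, height, max_overflow):
--     valid = [c for c in circles
--              if check_inside(c[0], c[1], width, height, max_overflow, c[2])]
--     best = max([(0, 0, 0, 0)] + valid, key=lambda c: (c[3], c[2]))
--     if best[2] == 0:
--         return (0, 0, 0, 0)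
--     return (best[0], best[1], best[2], best[3])
-- ===== Notes on version B (the rewrite author's own statement) =====
-- stated objective: simpler
-- what changed: Replaces A's fused best-keeping accumulator loop with a filter of the valid circles followed by a max reduction with key (priority, radius) over the baseline-prepended list.
import Mathlib
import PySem

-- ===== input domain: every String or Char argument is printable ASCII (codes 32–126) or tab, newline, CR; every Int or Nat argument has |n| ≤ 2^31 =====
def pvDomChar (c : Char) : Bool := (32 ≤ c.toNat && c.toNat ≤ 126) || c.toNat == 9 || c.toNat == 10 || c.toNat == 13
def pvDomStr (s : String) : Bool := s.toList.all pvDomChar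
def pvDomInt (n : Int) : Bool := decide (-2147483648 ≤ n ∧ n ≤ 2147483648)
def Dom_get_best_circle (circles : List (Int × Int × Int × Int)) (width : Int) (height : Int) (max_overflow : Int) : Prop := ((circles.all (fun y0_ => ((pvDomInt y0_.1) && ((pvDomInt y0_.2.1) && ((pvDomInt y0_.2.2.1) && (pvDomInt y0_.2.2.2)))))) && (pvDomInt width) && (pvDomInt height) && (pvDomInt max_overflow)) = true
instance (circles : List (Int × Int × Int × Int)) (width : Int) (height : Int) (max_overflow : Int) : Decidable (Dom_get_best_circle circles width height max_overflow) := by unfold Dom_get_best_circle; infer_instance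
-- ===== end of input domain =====

-- B replaces A's fused accumulator loop by a filter of the valid circles followed by a
-- first-maximal reduction (max with key (priority, radius) over the baseline-prepended list): simpler decomposition, same cost.

-- ===== PORT A =====
def check_inside (x y w h overflow rd : Int) : Bool :=
  ((x - rd ≥ -overflow) && (y - rd ≥ -overflow)) &&
    ((x + rd < w + overflow) && (y + rd < h + overflow))

def get_best_circle (circles : List (Int × Int × Int × Int)) (width : Int) (height : Int) (max_overflow : Int) : Int × Int × Int × Int :=
  let st := circles.foldl (fun (s : Int × Int × Int × Int) circle =>
      let x := circle.1
      let y := circle.2.1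
      let r := circle.2.2.1
      let pr := circle.2.2.2
      if (((pr > s.2.2.2) || ((pr == s.2.2.2) && (r > s.2.2.1))) &&
            check_inside x y width height max_overflow r) = true
      then circle else s) (0, 0, 0, 0)
  if st.2.2.1 = 0 then (0, 0, 0, 0) else st

-- ===== PORT B =====
def check_inside_alt (x y w h overflow rd : Int) : Bool :=
  (x - rd ≥ -overflow) && (y - rd ≥ -overflow) &&
    (x + rd < w + overflow) && (y + rd < h + overflow)

def get_best_circle_alt (circles : List (Int × Int × Int × Int)) (width : Int) (height : Int) (max_overflow : Int) : Int × Int × Int × Int :=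
  let valid := circles.filter (fun c => check_inside_alt c.1 c.2.1 width height max_overflow c.2.2.1)
  -- max([(0,0,0,0)] + valid, key=λc.(c[3],c[2])): the list is nonempty, so max2? is `some`
  let best := (PySem.List.max2? (((0 : Int), (0 : Int), (0 : Int), (0 : Int)) :: valid)
                (fun c => c.2.2.2) (fun c => c.2.2.1)).getD (0, 0, 0, 0)
  if best.2.2.1 = 0 then (0, 0, 0, 0) else (best.1, best.2.1, best.2.2.1, best.2.2.2)

-- ===== PRECONDITION & SPEC =====
def Spec_get_best_circle (circles : List (Int × Int × Int × Int)) (width : Int) (height : Int) (max_overflow : Int) (out : Int × Int × Int × Int) : Prop := out = get_best_circle_alt circles width height max_overflow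
instance (circles : List (Int × Int × Int × Int)) (width : Int) (height : Int) (max_overflow : Int) (out : Int × Int × Int × Int) : Decidable (Spec_get_best_circle circles width height max_overflow out) := by unfold Spec_get_best_circle; infer_instance

-- ===== CLAIM (what is proved, stated in full; the proofs are below) =====
def Claim_equal_get_best_circle : Prop := ∀ (circles : List (Int × Int × Int × Int)) (width : Int) (height : Int) (max_overflow : Int), Dom_get_best_circle circles width height max_overflow → Spec_get_best_circle circles width height max_overflow (get_best_circle circles width height max_overflow)

-- ===== LEMMAS AND PROOFS =====

-- max2? of a nonempty list is the plain running-max fold from its head.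
theorem max2?_cons_eq_foldl (l : List (Int × Int × Int × Int)) (a : Int × Int × Int × Int) :
    PySem.List.max2? (a :: l) (fun c => c.2.2.2) (fun c => c.2.2.1)
      = some (l.foldl (fun m x =>
          if (decide (m.2.2.2 < x.2.2.2) || !decide (x.2.2.2 < m.2.2.2) && decide (m.2.2.1 < x.2.2.1)) = true
          then x else m) a) := by
  show List.foldl _ (some a) l = _
  induction l generalizing a with
  | nil => rfl
  | cons b t ih =>
      simp only [List.foldl_cons]
      split <;> exact ih _

-- B's max2? step condition coincides with A's update condition on the filtered element.
theorem step_cond_eq (m x : Int × Int × Int × Int) :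
    (decide (m.2.2.2 < x.2.2.2) || !decide (x.2.2.2 < m.2.2.2) && decide (m.2.2.1 < x.2.2.1))
      = ((x.2.2.2 > m.2.2.2) || ((x.2.2.2 == m.2.2.2) && (x.2.2.1 > m.2.2.1))) := by
  by_cases h1 : m.2.2.2 < x.2.2.2 <;> by_cases h2 : x.2.2.2 < m.2.2.2 <;>
    simp [h1, h2, gt_iff_lt] <;> omega

theorem get_best_circle_spec : Claim_equal_get_best_circle := by
  intro circles width height max_overflow _
  show get_best_circle circles width height max_overflow = get_best_circle_alt circles width height max_overflow
  have hci : check_inside_alt = check_inside := by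
    funext x y w h o rd
    simp [check_inside, check_inside_alt, Bool.and_assoc]
  simp only [get_best_circle, get_best_circle_alt, max2?_cons_eq_foldl, hci, Option.getD_some,
    ← PySem.List.foldl_if_eq_foldl_filter
      (p := fun c : Int × Int × Int × Int => check_inside c.1 c.2.1 width height max_overflow c.2.2.1)
      (f := fun m x : Int × Int × Int × Int =>
        if (decide (m.2.2.2 < x.2.2.2) || !decide (x.2.2.2 < m.2.2.2) && decide (m.2.2.1 < x.2.2.1)) = true
        then x else m)]
  -- the two running folds agree step by step
  have heq := List.foldl_ext
    (fun (s circle : Int × Int × Int × Int) =>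
      if (((circle.2.2.2 > s.2.2.2) || ((circle.2.2.2 == s.2.2.2) && (circle.2.2.1 > s.2.2.1))) &&
            check_inside circle.1 circle.2.1 width height max_overflow circle.2.2.1) = true
      then circle else s)
    (fun (acc x : Int × Int × Int × Int) =>
      if check_inside x.1 x.2.1 width height max_overflow x.2.2.1 = true then
        if (decide (acc.2.2.2 < x.2.2.2) || !decide (x.2.2.2 < acc.2.2.2) && decide (acc.2.2.1 < x.2.2.1)) = true
        then x else acc
      else acc)
    (((0 : Int), (0 : Int), (0 : Int), (0 : Int))) (l := circles)
    (by
      intro s c _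
      beta_reduce
      rw [step_cond_eq]
      by_cases hv : check_inside c.1 c.2.1 width height max_overflow c.2.2.1 <;>
        by_cases hb : ((c.2.2.2 > s.2.2.2) || ((c.2.2.2 == s.2.2.2) && (c.2.2.1 > s.2.2.1))) = true <;>
        simp [hv, hb])
  rw [heq]
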